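-- pv_equiv track=rewrite | github.com/dosilt/Programmers-Python-dosilt | Level1/둘만의 암호.py | solution
-- ===== SOURCE A (Python) =====
-- def solution(s, skip, index):
--     skip = set(list(skip))
--     n = 0
--     alpha2num, num2alpha = {}, {}
--     for i in range(ord('z') - ord('a')+1):
--         if chr(ord('a') + i) in skip:
--             continue
--         alpha2num[chr(ord('a') + i)] = n
--         num2alpha[n] = chr(ord('a') + i)
--         n += 1
--
--     answer = ''
--     for alpha in s:
--         answer += num2alpha[(alpha2num[alpha] + index) % len(alpha2num)]
--     return answer
-- ===== SOURCE B (Python) =====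
-- def solution(s, skip, index):
--     alphabet = 'abcdefghijklmnopqrstuvwxyz'
--     m = sum(1 for c in alphabet if c not in skip)
--     out = []
--     for ch in s:
--         pos = ord(ch) - ord('a')
--         for _ in range(index % m):
--             pos = (pos + 1) % 26
--             while alphabet[pos] in skip:
--                 pos = (pos + 1) % 26
--         out.append(alphabet[pos])
--     return ''.join(out)
-- ===== Notes on version B (the rewrite author's own statement) =====
-- stated objective: alternative
-- what changed: B builds no lookup tables and computes no ranks: it reduces the shift to index % m steps and, for each character, walks that many successor steps around the 26-letter cycle skipping the excluded letters, so A's two index dicts and the per-character rank/unrank modular arithmetic disappear entirely.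
import Mathlib
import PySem

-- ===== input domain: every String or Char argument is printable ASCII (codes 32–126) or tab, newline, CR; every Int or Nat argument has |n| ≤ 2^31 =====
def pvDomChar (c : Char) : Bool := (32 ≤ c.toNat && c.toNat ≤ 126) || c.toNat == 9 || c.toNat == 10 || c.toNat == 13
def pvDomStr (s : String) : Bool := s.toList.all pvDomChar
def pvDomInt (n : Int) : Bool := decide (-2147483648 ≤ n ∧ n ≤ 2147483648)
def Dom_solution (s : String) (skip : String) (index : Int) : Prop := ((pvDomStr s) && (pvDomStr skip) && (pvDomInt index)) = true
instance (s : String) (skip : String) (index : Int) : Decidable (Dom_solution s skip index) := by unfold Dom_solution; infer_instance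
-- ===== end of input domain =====

-- B replaces A's two index dictionaries and per-character rank/unrank modular arithmetic by a
-- successor walk: each character is advanced (index % m) steps around the 26-letter cycle,
-- skipping excluded letters (alternative decomposition, similar cost on these sizes).

-- ===== PORT A =====
-- literal port of A: builds alpha2num / num2alpha over range(26) skipping skip, then folds over s
def solution (s : String) (skip : String) (index : Int) : String :=
  let skipSet := PySem.Set.ofList skip.toList
  let st : Int × PySem.Dict Char Int × PySem.Dict Int Char :=
    (PySem.List.pyRange 0 26 1).foldl
      (fun st i =>
        let c := Char.ofNat (97 + i.toNat)
        if c ∈ skipSet then st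
        else (st.1 + 1, st.2.1.insert c st.1, st.2.2.insert st.1 c))
      (0, PySem.Dict.empty, PySem.Dict.empty)
  -- num2alpha[...] / alpha2num[...] raise KeyError and '% 0' raises on inputs excluded by Pre_;
  -- the defaults below are never reached inside Pre_.
  String.mk (s.toList.foldl
    (fun answer alpha =>
      answer ++ [st.2.2.getD (PySem.Int.mod (st.2.1.getD alpha 0 + index) st.2.1.size) ' '])
    [])

-- ===== PORT B =====
-- B-side helpers: the fixed alphabet and the inner `while alphabet[pos] in skip` loop.
-- Fuel 26 makes the while-loop total; inside Pre_ some letter is unskipped, so 26 probes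
-- always reach an unskipped position and the fuel is never exhausted.
def pvAlphaB : List Char := "abcdefghijklmnopqrstuvwxyz".toList

def pvWhileSkip (skipL : List Char) : Nat → Int → Int
  | 0, pos => pos
  | fuel+1, pos =>
      if skipL.contains (PySem.List.pyGetD pvAlphaB pos ' ')
      then pvWhileSkip skipL fuel (PySem.Int.mod (pos + 1) 26)
      else pos

-- one step of the walk: pos = (pos+1) % 26, then the while-loop over skipped letters
def pvStepB (skipL : List Char) (pos : Int) : Int :=
  pvWhileSkip skipL 26 (PySem.Int.mod (pos + 1) 26)

-- literal port of B (Source B): m = number of unskipped letters; per character walk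
-- (index % m) successor steps from ord(ch)-97, then read alphabet[pos]
def solution_alt (s : String) (skip : String) (index : Int) : String :=
  let m : Int := (pvAlphaB.countP (fun c => !(skip.toList.contains c)) : Int)
  String.mk (s.toList.map (fun ch =>
    let pos := (List.range (PySem.Int.mod index m).toNat).foldl
      (fun pos _ => pvStepB skip.toList pos) ((ch.toNat : Int) - 97)
    PySem.List.pyGetD pvAlphaB pos ' '))

-- ===== PRECONDITION & SPEC =====
-- Pre_ excludes exactly the inputs where Python A raises: a KeyError whenever some character of s
-- is not a non-skipped lowercase letter (this also covers the all-letters-skipped '% 0' case).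
def Pre_solution (s : String) (skip : String) (index : Int) : Prop :=
  (s.toList.all fun c =>
    "abcdefghijklmnopqrstuvwxyz".toList.contains c && !(skip.toList.contains c)) = true
instance (s : String) (skip : String) (index : Int) : Decidable (Pre_solution s skip index) := by
  unfold Pre_solution; infer_instance
def pvWitness_solution : String × String × Int := ("bc", "a", 5)
def Spec_solution (s : String) (skip : String) (index : Int) (out : String) : Prop := out = solution_alt s skip index
instance (s : String) (skip : String) (index : Int) (out : String) : Decidable (Spec_solution s skip index out) := by unfold Spec_solution; infer_instance

-- ===== CLAIM (what is proved, stated in full; the proofs are below) =====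
def Claim_equal_solution : Prop := ∀ (s : String) (skip : String) (index : Int), Dom_solution s skip index → Pre_solution s skip index → Spec_solution s skip index (solution s skip index)

-- ===== LEMMAS AND PROOFS =====

-- ---- A-side machinery: the builder loop and the two dictionaries ----

-- A's builder loop, decomposed into its three components
theorem buildA_eq {R : List Char} : ∀ (n₀ : Int) (d₁ : PySem.Dict Char Int) (d₂ : PySem.Dict Int Char),
    R.foldl (fun (st : Int × PySem.Dict Char Int × PySem.Dict Int Char) c =>
        (st.1 + 1, st.2.1.insert c st.1, st.2.2.insert st.1 c)) (n₀, d₁, d₂)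
      = (n₀ + R.length,
         (PySem.List.enumerate R n₀).foldl (fun d p => d.insert p.2 p.1) d₁,
         (PySem.List.enumerate R n₀).foldl (fun d p => d.insert p.1 p.2) d₂) := by
  induction R with
  | nil => intro n₀ d₁ d₂; simp [PySem.List.enumerate_nil]
  | cons x xs ih =>
    intro n₀ d₁ d₂
    simp only [List.foldl_cons, PySem.List.enumerate_cons, ih]
    congr 1
    simp only [List.length_cons]; push_cast; ring

theorem nodup_keys_a2n {R : List Char} (hR : R.Nodup) (n₀ : Int) :
    ((PySem.List.enumerate R n₀).foldl (fun (d : PySem.Dict Char Int) p => d.insert p.2 p.1)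
      PySem.Dict.empty).items
      = (PySem.List.enumerate R n₀).map (fun p => (p.2, p.1)) := by
  have h := PySem.Dict.items_foldl_insert_fresh (l := PySem.List.enumerate R n₀)
    (k := fun p => p.2) (v := fun p => p.1) (d := PySem.Dict.empty)
    (by intro a _; simp) (by rw [PySem.List.map_snd_enumerate]; exact hR)
  simpa using h

theorem items_n2a {R : List Char} (n₀ : Int) :
    ((PySem.List.enumerate R n₀).foldl (fun (d : PySem.Dict Int Char) p => d.insert p.1 p.2)
      PySem.Dict.empty).items
      = PySem.List.enumerate R n₀ := by
  have hnd : ((PySem.List.enumerate R n₀).map (fun p => p.1)).Nodup := by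
    rw [List.Nodup, List.pairwise_map]
    exact (PySem.List.pairwise_lt_enumerate R n₀).imp (fun h => by omega)
  have h := PySem.Dict.items_foldl_insert_fresh (l := PySem.List.enumerate R n₀)
    (k := fun p => p.1) (v := fun p => p.2) (d := PySem.Dict.empty)
    (by intro a _; simp) hnd
  simpa using h

-- the fold over range(26) building chr(97+i) is the fold over the literal alphabet
theorem foldl_range26 {β : Type} (g : β → Char → β) (init : β) :
    (PySem.List.pyRange 0 26 1).foldl (fun st i => g st (Char.ofNat (97 + i.toNat))) init
      = pvAlphaB.foldl g init := by
  have hmap : (PySem.List.pyRange 0 26 1).map (fun i => Char.ofNat (97 + i.toNat))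
      = pvAlphaB := by decide
  rw [← hmap, List.foldl_map]

theorem foldl_if_mem_skip {β : Type} (xs : List Char) (g : β → Char → β) :
    ∀ (l : List Char) (init : β),
      l.foldl (fun st c => if c ∈ PySem.Set.ofList xs then st else g st c) init
        = (l.filter (fun c => !(xs.contains c))).foldl g init := by
  intro l
  induction l with
  | nil => intro init; rfl
  | cons x ls ih =>
    intro init
    rw [List.foldl_cons, List.filter_cons]
    by_cases h : x ∈ xs
    · have hc : (!xs.contains x) = false := by simpa using h
      rw [if_pos ((PySem.Set.mem_ofList _ _).mpr h), hc]
      simp only [Bool.false_eq_true, if_false]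
      exact ih init
    · have hc : (!xs.contains x) = true := by simpa using h
      rw [if_neg (fun hx => h ((PySem.Set.mem_ofList _ _).mp hx)), hc]
      simp only [if_true, List.foldl_cons]
      exact ih (g init x)

-- A's whole builder fold over range(26), in one step
theorem buildA_full (skipL : List Char) (R : List Char)
    (hR : R = pvAlphaB.filter (fun c => !(skipL.contains c))) :
    (PySem.List.pyRange 0 26 1).foldl
      (fun (st : Int × PySem.Dict Char Int × PySem.Dict Int Char) i =>
        if Char.ofNat (97 + i.toNat) ∈ PySem.Set.ofList skipL then st
        else (st.1 + 1, st.2.1.insert (Char.ofNat (97 + i.toNat)) st.1,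
              st.2.2.insert st.1 (Char.ofNat (97 + i.toNat))))
      (0, PySem.Dict.empty, PySem.Dict.empty)
      = ((R.length : Int),
         (PySem.List.enumerate R 0).foldl (fun d p => d.insert p.2 p.1) PySem.Dict.empty,
         (PySem.List.enumerate R 0).foldl (fun d p => d.insert p.1 p.2) PySem.Dict.empty) := by
  trans (pvAlphaB.foldl
      (fun (st : Int × PySem.Dict Char Int × PySem.Dict Int Char) c =>
        if c ∈ PySem.Set.ofList skipL then st
        else (st.1 + 1, st.2.1.insert c st.1, st.2.2.insert st.1 c))
      (0, PySem.Dict.empty, PySem.Dict.empty))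
  · exact foldl_range26
      (fun (st : Int × PySem.Dict Char Int × PySem.Dict Int Char) c =>
        if c ∈ PySem.Set.ofList skipL then st
        else (st.1 + 1, st.2.1.insert c st.1, st.2.2.insert st.1 c))
      (0, PySem.Dict.empty, PySem.Dict.empty)
  · rw [foldl_if_mem_skip, ← hR, buildA_eq]
    simp

theorem nodup_fst_enumerate {R : List Char} (n₀ : Int) :
    ((PySem.List.enumerate R n₀).map (fun p => p.1)).Nodup := by
  rw [List.Nodup, List.pairwise_map]
  exact (PySem.List.pairwise_lt_enumerate R n₀).imp (fun h => by omega)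

-- ---- B-side machinery: the positions of the unskipped letters and the walk ----

-- position i (0..25) of the alphabet is kept (its letter is not skipped)
def pvKeep (skipL : List Char) (i : Nat) : Bool := !(skipL.contains (pvAlphaB.getD i ' '))

-- the increasing list of kept positions
def pvQ (skipL : List Char) : List Nat := (List.range 26).filter (pvKeep skipL)

theorem pvQ_sorted (skipL : List Char) : (pvQ skipL).Pairwise (· < ·) :=
  List.Pairwise.filter _ List.pairwise_lt_range

theorem mem_pvQ (skipL : List Char) (i : Nat) :
    i ∈ pvQ skipL ↔ i < 26 ∧ pvKeep skipL i = true := by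
  simp [pvQ, List.mem_filter, List.mem_range]

theorem pvQ_getElem_lt26 (skipL : List Char) (k : Nat) (hk : k < (pvQ skipL).length) :
    (pvQ skipL)[k] < 26 :=
  ((mem_pvQ skipL _).mp (List.getElem_mem hk)).1

theorem pvQ_getElem_keep (skipL : List Char) (k : Nat) (hk : k < (pvQ skipL).length) :
    pvKeep skipL (pvQ skipL)[k] = true :=
  ((mem_pvQ skipL _).mp (List.getElem_mem hk)).2

theorem pvQ_strictMono (skipL : List Char) (j₁ j₂ : Nat)
    (h₁ : j₁ < (pvQ skipL).length) (h₂ : j₂ < (pvQ skipL).length) (h : j₁ < j₂) :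
    (pvQ skipL)[j₁] < (pvQ skipL)[j₂] :=
  (List.pairwise_iff_getElem.mp (pvQ_sorted skipL)) j₁ j₂ h₁ h₂ h

-- no kept position strictly between consecutive elements of pvQ (cyclically)
theorem pvQ_no_keep_between (skipL : List Char) (k : Nat) (hk : k < (pvQ skipL).length)
    (hk1 : k + 1 < (pvQ skipL).length) (i : Nat)
    (hlo : (pvQ skipL)[k] < i) (hhi : i < (pvQ skipL)[k+1]) :
    pvKeep skipL i = false := by
  by_contra h
  have hP : pvKeep skipL i = true := by
    cases hQ : pvKeep skipL i with
    | true => rfl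
    | false => exact absurd hQ h
  have hi26 : i < 26 := lt_trans hhi (pvQ_getElem_lt26 skipL _ hk1)
  obtain ⟨j, hj, hji⟩ := List.mem_iff_getElem.mp ((mem_pvQ skipL i).mpr ⟨hi26, hP⟩)
  rcases Nat.lt_or_ge j (k+1) with hjk | hjk
  · rcases Nat.lt_or_ge j k with hjk' | hjk'
    · exact absurd (hji ▸ pvQ_strictMono skipL j k hj hk hjk') (by omega)
    · have : j = k := by omega
      subst this; omega
  · rcases Nat.lt_or_ge (k+1) j with hjk' | hjk'
    · exact absurd (hji ▸ pvQ_strictMono skipL (k+1) j hk1 hj hjk') (by omega)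
    · have : j = k + 1 := by omega
      subst this; omega

-- no kept position below pvQ[0]
theorem pvQ_no_keep_below (skipL : List Char) (h0 : 0 < (pvQ skipL).length) (i : Nat)
    (hhi : i < (pvQ skipL)[0]) : pvKeep skipL i = false := by
  by_contra h
  have hP : pvKeep skipL i = true := by
    cases hQ : pvKeep skipL i with
    | true => rfl
    | false => exact absurd hQ h
  have hi26 : i < 26 := lt_trans hhi (pvQ_getElem_lt26 skipL _ h0)
  obtain ⟨j, hj, hji⟩ := List.mem_iff_getElem.mp ((mem_pvQ skipL i).mpr ⟨hi26, hP⟩)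
  rcases Nat.eq_zero_or_pos j with hj0 | hj0
  · subst hj0; omega
  · exact absurd (hji ▸ pvQ_strictMono skipL 0 j h0 hj hj0) (by omega)

-- no kept position above the last element of pvQ
theorem pvQ_no_keep_above (skipL : List Char) (k : Nat) (hk : k < (pvQ skipL).length)
    (hlast : k + 1 = (pvQ skipL).length) (i : Nat)
    (hlo : (pvQ skipL)[k] < i) (hi26 : i < 26) : pvKeep skipL i = false := by
  by_contra h
  have hP : pvKeep skipL i = true := by
    cases hQ : pvKeep skipL i with
    | true => rfl
    | false => exact absurd hQ h
  obtain ⟨j, hj, hji⟩ := List.mem_iff_getElem.mp ((mem_pvQ skipL i).mpr ⟨hi26, hP⟩)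
  rcases Nat.lt_or_ge j k with hjk | hjk
  · exact absurd (hji ▸ pvQ_strictMono skipL j k hj hk hjk) (by omega)
  · have : j = k := by omega
    subst this; omega

-- the contains test in pvWhileSkip is the negation of pvKeep
theorem contains_eq_not_keep (skipL : List Char) (q : Nat) :
    skipL.contains (PySem.List.pyGetD pvAlphaB (q : Int) ' ') = !(pvKeep skipL q) := by
  rw [PySem.List.pyGetD_natCast]; simp [pvKeep]

-- the while-loop scans a block of skipped positions and stops at the first kept one (no wrap)
theorem pvWhileSkip_run (skipL : List Char) : ∀ (fuel q r : Nat), q ≤ r → r < 26 →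
    (∀ i, q ≤ i → i < r → pvKeep skipL i = false) → pvKeep skipL r = true → r - q < fuel →
    pvWhileSkip skipL fuel (q : Int) = (r : Int) := by
  intro fuel
  induction fuel with
  | zero => intro q r _ _ _ _ hfuel; omega
  | succ fuel ih =>
    intro q r hqr hr26 hbad hgood hfuel
    rw [pvWhileSkip, contains_eq_not_keep]
    rcases Nat.eq_or_lt_of_le hqr with heq | hlt
    · subst heq; rw [hgood]; simp
    · rw [hbad q le_rfl hlt]
      simp only [Bool.not_false, if_true]
      have hq26 : q + 1 < 26 := by omega
      have hmod : PySem.Int.mod ((q : Int) + 1) 26 = ((q + 1 : Nat) : Int) := by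
        rw [PySem.Int.mod_eq_emod_of_pos (by norm_num)]; omega
      rw [hmod]
      exact ih (q+1) r hlt hr26 (fun i h1 h2 => hbad i (by omega) h2) hgood (by omega)

-- the while-loop wraps past position 25 when all of [q, 26) is skipped
theorem pvWhileSkip_wrap (skipL : List Char) : ∀ (fuel q : Nat), q < 26 →
    (∀ i, q ≤ i → i < 26 → pvKeep skipL i = false) → 26 - q ≤ fuel →
    pvWhileSkip skipL fuel (q : Int) = pvWhileSkip skipL (fuel - (26 - q)) 0 := by
  intro fuel
  induction fuel with
  | zero => intro q hq _ hfuel; omega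
  | succ fuel ih =>
    intro q hq hbad hfuel
    rw [pvWhileSkip, contains_eq_not_keep, hbad q le_rfl hq]
    simp only [Bool.not_false, if_true]
    rcases Nat.eq_or_lt_of_le (by omega : q + 1 ≤ 26) with heq | hlt
    · have hmod : PySem.Int.mod ((q : Int) + 1) 26 = 0 := by
        rw [PySem.Int.mod_eq_emod_of_pos (by norm_num)]; omega
      rw [hmod]
      have : fuel + 1 - (26 - q) = fuel := by omega
      rw [this]
    · have hmod : PySem.Int.mod ((q : Int) + 1) 26 = ((q + 1 : Nat) : Int) := by
        rw [PySem.Int.mod_eq_emod_of_pos (by norm_num)]; omega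
      rw [hmod, ih (q+1) (by omega) (fun i h1 h2 => hbad i (by omega) h2) (by omega)]
      have : fuel - (26 - (q + 1)) = fuel + 1 - (26 - q) := by omega
      rw [this]

-- one walk step from the k-th kept position lands on the (k+1 mod m)-th kept position
theorem pvStep_succ (skipL : List Char) (k : Nat) (hk : k < (pvQ skipL).length) :
    pvStepB skipL ((pvQ skipL).getD k 0 : Nat) = ((pvQ skipL).getD ((k+1) % (pvQ skipL).length) 0 : Nat) := by
  have hm : 0 < (pvQ skipL).length := by omega
  rw [List.getD_eq_getElem _ _ hk]
  have hq26 : (pvQ skipL)[k] < 26 := pvQ_getElem_lt26 skipL k hk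
  unfold pvStepB
  rcases Nat.lt_or_ge (k+1) (pvQ skipL).length with hk1 | hk1
  · -- no wrap in the index: target is pvQ[k+1]
    rw [List.getD_eq_getElem _ _ (by rw [Nat.mod_eq_of_lt hk1]; exact hk1)]
    have hlt : (pvQ skipL)[k] < (pvQ skipL)[k+1] := pvQ_strictMono skipL k (k+1) hk hk1 (by omega)
    have hr26 : (pvQ skipL)[k+1] < 26 := pvQ_getElem_lt26 skipL (k+1) hk1
    have hmod : PySem.Int.mod (((pvQ skipL)[k] : Int) + 1) 26 = (((pvQ skipL)[k] + 1 : Nat) : Int) := by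
      rw [PySem.Int.mod_eq_emod_of_pos (by norm_num)]; omega
    rw [hmod, pvWhileSkip_run skipL 26 ((pvQ skipL)[k] + 1) ((pvQ skipL)[(k+1) % (pvQ skipL).length]'(by rw [Nat.mod_eq_of_lt hk1]; exact hk1))]
    · simp only [Nat.mod_eq_of_lt hk1]; omega
    · simp only [Nat.mod_eq_of_lt hk1]; exact hr26
    · intro i h1 h2
      simp only [Nat.mod_eq_of_lt hk1] at h2
      exact pvQ_no_keep_between skipL k hk hk1 i (by omega) h2
    · simp only [Nat.mod_eq_of_lt hk1]; exact pvQ_getElem_keep skipL (k+1) hk1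
    · simp only [Nat.mod_eq_of_lt hk1]; omega
  · -- k is the last index: wrap to pvQ[0]
    have hklast : k + 1 = (pvQ skipL).length := by omega
    have hmodidx : (k+1) % (pvQ skipL).length = 0 := by rw [hklast]; exact Nat.mod_self _
    rw [hmodidx, List.getD_eq_getElem _ _ hm]
    have h0le : (pvQ skipL)[0] ≤ (pvQ skipL)[k] := by
      rcases Nat.eq_zero_or_pos k with hk0 | hk0
      · subst hk0; exact le_rfl
      · exact le_of_lt (pvQ_strictMono skipL 0 k hm hk hk0)
    rcases Nat.eq_or_lt_of_le (by omega : (pvQ skipL)[k] + 1 ≤ 26) with h25 | h25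
    · -- pvQ[k] = 25: the increment itself wraps to 0
      have hmod : PySem.Int.mod (((pvQ skipL)[k] : Int) + 1) 26 = ((0 : Nat) : Int) := by
        rw [PySem.Int.mod_eq_emod_of_pos (by norm_num)]; omega
      rw [hmod]
      exact pvWhileSkip_run skipL 26 0 _ (Nat.zero_le _) (pvQ_getElem_lt26 skipL 0 hm)
        (fun i h1 h2 => pvQ_no_keep_below skipL hm i h2)
        (pvQ_getElem_keep skipL 0 hm) (by omega)
    · -- pvQ[k] < 25: scan [pvQ[k]+1, 26), wrap, then scan [0, pvQ[0])
      have hmod : PySem.Int.mod (((pvQ skipL)[k] : Int) + 1) 26 = (((pvQ skipL)[k] + 1 : Nat) : Int) := by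
        rw [PySem.Int.mod_eq_emod_of_pos (by norm_num)]; omega
      rw [hmod, pvWhileSkip_wrap skipL 26 ((pvQ skipL)[k] + 1) h25
        (fun i h1 h2 => pvQ_no_keep_above skipL k hk hklast i (by omega) h2) (by omega)]
      have h0lt : (pvQ skipL)[0] < (pvQ skipL)[k] + 1 := by omega
      have : ((0 : Nat) : Int) = (0 : Int) := rfl
      rw [← this]
      exact pvWhileSkip_run skipL _ 0 _ (Nat.zero_le _) (pvQ_getElem_lt26 skipL 0 hm)
        (fun i h1 h2 => pvQ_no_keep_below skipL hm i h2)
        (pvQ_getElem_keep skipL 0 hm) (by omega)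

-- walking t steps from the k-th kept position lands on the (k+t mod m)-th kept position
theorem pvWalk (skipL : List Char) (t k : Nat) (hk : k < (pvQ skipL).length) :
    (List.range t).foldl (fun pos _ => pvStepB skipL pos) ((pvQ skipL).getD k 0 : Nat)
      = ((pvQ skipL).getD ((k + t) % (pvQ skipL).length) 0 : Nat) := by
  have hm : 0 < (pvQ skipL).length := by omega
  induction t with
  | zero => simp [Nat.mod_eq_of_lt hk]
  | succ t ih =>
    rw [List.range_succ, List.foldl_append, ih]
    simp only [List.foldl_cons, List.foldl_nil]
    rw [pvStep_succ skipL ((k + t) % (pvQ skipL).length) (Nat.mod_lt _ hm)]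
    congr 2
    rw [Nat.mod_add_mod]
    congr 1

-- the reduced alphabet R is the kept positions read through the alphabet
theorem filter_eq_map_pvQ (skipL : List Char) :
    pvAlphaB.filter (fun c => !(skipL.contains c))
      = (pvQ skipL).map (fun i => pvAlphaB.getD i ' ') := by
  conv_lhs => rw [show pvAlphaB = (List.range 26).map (fun i => pvAlphaB.getD i ' ') from by decide]
  rw [List.filter_map]
  rfl

-- code of the letter at a kept position
theorem alphaB_toNat (i : Nat) (hi : i < 26) : (pvAlphaB.getD i ' ').toNat = 97 + i := by
  revert hi
  revert i
  decide

-- index arithmetic: stepping (index mod m) times shifts the rank by index, mod m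
theorem idx_arith (k : Nat) (index : Int) (m : Nat) (hm : 0 < m) (hk : k < m) :
    (k + (PySem.Int.mod index (m : Int)).toNat) % m
      = (PySem.Int.mod ((k : Int) + index) (m : Int)).toNat := by
  have hmz : (m : Int) ≠ 0 := by exact_mod_cast hm.ne'
  rw [PySem.Int.mod_eq_emod_of_pos (by exact_mod_cast hm),
      PySem.Int.mod_eq_emod_of_pos (by exact_mod_cast hm)]
  have ht : ((index % (m : Int)).toNat : Int) = index % (m : Int) :=
    Int.toNat_of_nonneg (Int.emod_nonneg _ hmz)
  apply Int.natCast_inj.mp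
  rw [Int.natCast_emod, Int.toNat_of_nonneg (Int.emod_nonneg _ hmz)]
  push_cast [ht]
  rw [Int.add_emod ((k : Int)) (index % (m : Int)), Int.emod_emod, ← Int.add_emod]

-- ===== VERDICT (by name: the statement is the Claim_ definition above) =====
theorem solution_spec : Claim_equal_solution := by
  intro s skip index _ hpre
  unfold Pre_solution at hpre
  unfold Spec_solution solution solution_alt
  simp only []
  set R := pvAlphaB.filter (fun c => !(skip.toList.contains c)) with hRdef
  have hRnd : R.Nodup := List.Nodup.filter _ (by decide)
  rw [buildA_full skip.toList R hRdef]
  set a2nD := (PySem.List.enumerate R 0).foldl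
      (fun (d : PySem.Dict Char Int) p => d.insert p.2 p.1) PySem.Dict.empty with ha2n
  set n2aD := (PySem.List.enumerate R 0).foldl
      (fun (d : PySem.Dict Int Char) p => d.insert p.1 p.2) PySem.Dict.empty with hn2a
  have hItems1 : a2nD.items = (PySem.List.enumerate R 0).map (fun p => (p.2, p.1)) :=
    nodup_keys_a2n hRnd 0
  have hItems2 : n2aD.items = PySem.List.enumerate R 0 := items_n2a 0
  have hK1 : a2nD.keys.Nodup := by
    have hk : a2nD.keys = a2nD.items.map (fun p => p.1) := rfl
    rw [hk, hItems1, List.map_map]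
    have h2 : ((fun (p : Char × Int) => p.1) ∘ fun (p : Int × Char) => (p.2, p.1))
        = (fun (p : Int × Char) => p.2) := rfl
    rw [h2, PySem.List.map_snd_enumerate]
    exact hRnd
  have hK2 : n2aD.keys.Nodup := by
    have hk : n2aD.keys = n2aD.items.map (fun p => p.1) := rfl
    rw [hk, hItems2]; exact nodup_fst_enumerate 0
  have hsize : (a2nD.size : Int) = (R.length : Int) := by
    show ((a2nD.items.length : Nat) : Int) = _
    rw [hItems1]; simp [PySem.List.length_enumerate]
  have hQR : R = (pvQ skip.toList).map (fun i => pvAlphaB.getD i ' ') :=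
    filter_eq_map_pvQ skip.toList
  have hQlen : (pvQ skip.toList).length = R.length := by rw [hQR, List.length_map]
  have hcount : ((pvAlphaB.countP (fun c => !(skip.toList.contains c)) : Nat) : Int)
      = (R.length : Int) := by
    rw [List.countP_eq_length_filter, hRdef]
  rw [PySem.List.foldl_append_singleton_eq_map, List.nil_append]
  congr 1
  apply List.map_congr_left
  intro alpha hmem
  have hmem' := (List.all_eq_true.mp hpre) alpha hmem
  simp only [Bool.and_eq_true, List.contains_eq_mem, decide_eq_true_eq, Bool.not_eq_true',
    decide_eq_false_iff_not] at hmem'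
  obtain ⟨hab, hns⟩ := hmem'
  have hmemR : alpha ∈ R := by
    rw [hRdef, List.mem_filter]
    exact ⟨hab, by simpa using hns⟩
  obtain ⟨k, hk, hEq⟩ := List.mem_iff_getElem.mp hmemR
  have hkQ : k < (pvQ skip.toList).length := by omega
  have hpairk : ((0 : Int) + (k : Int), R[k]) ∈ PySem.List.enumerate R 0 :=
    (PySem.List.mem_enumerate_iff _ _ _).mpr ⟨k, hk, rfl⟩
  have hA2 : a2nD.getD alpha 0 = (k : Int) := by
    refine PySem.Dict.getD_of_mem_items _ ?_ hK1 _
    rw [hItems1]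
    have h1 := List.mem_map_of_mem (f := fun (p : Int × Char) => (p.2, p.1)) hpairk
    simpa [hEq] using h1
  have hm : (0 : Int) < (R.length : Int) := by
    have : 0 < R.length := List.length_pos_of_mem hmemR
    exact_mod_cast this
  set j := PySem.Int.mod ((k : Int) + index) (R.length : Int) with hj
  have hj0 : 0 ≤ j := PySem.Int.mod_nonneg _ hm
  have hjm : j < (R.length : Int) := PySem.Int.mod_lt _ hm
  have hjn : j.toNat < R.length := by omega
  have hN2 : n2aD.getD j ' ' = R[j.toNat] := by
    refine PySem.Dict.getD_of_mem_items _ ?_ hK2 _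
    rw [hItems2]
    refine (PySem.List.mem_enumerate_iff _ _ _).mpr ⟨j.toNat, hjn, ?_⟩
    rw [Prod.mk.injEq]
    exact ⟨by omega, rfl⟩
  -- B side: the initial position is the k-th kept position
  have hQk26 : (pvQ skip.toList)[k] < 26 := pvQ_getElem_lt26 _ k hkQ
  have halphaf : alpha = pvAlphaB.getD (pvQ skip.toList)[k] ' ' := by
    rw [← hEq, List.getElem_of_eq hQR hk, List.getElem_map]
  have hinit : (alpha.toNat : Int) - 97 = (((pvQ skip.toList).getD k 0 : Nat) : Int) := by
    rw [List.getD_eq_getElem _ _ hkQ, halphaf, alphaB_toNat _ hQk26]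
    push_cast; omega
  rw [hcount, hA2, hsize, ← hj, hN2, hinit, pvWalk skip.toList _ k hkQ,
      PySem.List.pyGetD_natCast]
  have hjidx : (k + (PySem.Int.mod index ((R.length : Nat) : Int)).toNat) % (pvQ skip.toList).length
      = j.toNat := by
    rw [hQlen, hj]
    exact idx_arith k index R.length (by exact_mod_cast hm) hk
  rw [hjidx,
      List.getD_eq_getElem (pvQ skip.toList) 0 (show j.toNat < (pvQ skip.toList).length by omega),
      List.getElem_of_eq hQR hjn, List.getElem_map]
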